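-- pv_equiv track=rewrite | github.com/zhaizhaoyue/SecSight-Retriever | src/rag/retriever/hybrid.py | best_snippet
-- ===== SOURCE A (Python) =====
-- from typing import Dict, Any, List, Optional, Iterable, Tuple, Set
--
-- def best_snippet(raw: str, q_terms: Set[str], win_chars: int = 700) -> str:
--     txt = (raw or "").replace("\n", " ").strip()
--     if len(txt) <= win_chars:
--         return txt
--     words = txt.split()
--     qset = {t.lower().strip(".,;:()") for t in q_terms if t}
--     positions = [i for i, w in enumerate(words) if w.lower().strip(".,;:()") in qset]
--     if not positions:
--         return txt[:win_chars]
--     best_score, best_l = -1, 0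
--     for p in positions:
--         L = max(0, p - 20); R = min(len(words), p + 20)
--         score = sum(1 for w in words[L:R] if w.lower().strip(".,;:()") in qset)
--         if score > best_score:
--             best_score, best_l = score, L
--     snippet = " ".join(words[best_l:best_l + 80])
--     return snippet[:win_chars]
-- ===== SOURCE B (Python) =====
-- def best_snippet(raw, q_terms, win_chars=700):
--     txt = (raw or "").replace("\n", " ").strip()
--     if len(txt) <= win_chars:
--         return txt
--     words = txt.split()
--     qset = {t.lower().strip(".,;:()") for t in q_terms if t}
--     # normalize each word once into a 0/1 mask, then prefix sums: each window scored by one subtraction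
--     mask = [1 if w.lower().strip(".,;:()") in qset else 0 for w in words]
--     pref = [0]
--     s = 0
--     for m in mask:
--         s += m
--         pref.append(s)
--     n = len(words)
--     best_score, best_l = -1, 0
--     for p, m in enumerate(mask):
--         if m:
--             L = max(0, p - 20)
--             score = pref[min(n, p + 20)] - pref[L]
--             if score > best_score:
--                 best_score, best_l = score, L
--     if best_score < 0:
--         return txt[:win_chars]
--     return " ".join(words[best_l:best_l + 80])[:win_chars]
-- ===== Notes on version B (the rewrite author's own statement) =====
-- stated objective: alternative
-- what changed: B normalizes each word once into a 0/1 match mask and builds prefix sums, scoring every window by one subtraction instead of re-normalizing and re-scanning the 40-word window around each matching position; it trades one extra O(N) mask/prefix pass for the removal of the per-position window rescans.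
import Mathlib
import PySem

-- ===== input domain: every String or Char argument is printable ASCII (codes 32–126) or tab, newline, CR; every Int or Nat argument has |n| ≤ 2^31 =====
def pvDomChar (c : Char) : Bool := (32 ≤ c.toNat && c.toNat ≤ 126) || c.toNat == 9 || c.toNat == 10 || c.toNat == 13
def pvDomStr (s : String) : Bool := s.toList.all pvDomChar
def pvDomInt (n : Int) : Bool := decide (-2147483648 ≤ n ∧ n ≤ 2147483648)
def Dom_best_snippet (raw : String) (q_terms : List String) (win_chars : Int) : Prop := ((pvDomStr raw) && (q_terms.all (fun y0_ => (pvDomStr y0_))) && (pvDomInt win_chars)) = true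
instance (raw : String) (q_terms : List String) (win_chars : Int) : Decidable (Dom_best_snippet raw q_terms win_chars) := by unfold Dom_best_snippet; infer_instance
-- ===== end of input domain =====

-- B replaces A's per-position 40-word window rescans (re-normalizing every window word) by a
-- 0/1 match mask computed once plus prefix sums, scoring each window by one subtraction.

-- ===== PORT A =====
-- w.lower().strip(".,;:()")  (the normalization both Pythons apply, line for line)
def pvNorm (w : String) : String := PySem.Str.stripChars (PySem.Str.lower w) ".,;:()"

-- the body of A's 'for p in positions' loop
def pvStepA (words : List String) (qset : PySem.Set String) (st : Int × Int) (p : Int) : Int × Int :=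
  let L := max 0 (p - 20)
  let R := min ((words.length : Int)) (p + 20)
  let score := ((PySem.List.slice words (some L) (some R)).filter
      (fun w => PySem.Set.contains qset (pvNorm w))).length
  if (score : Int) > st.1 then ((score : Int), L) else st

def best_snippet (raw : String) (q_terms : List String) (win_chars : Int) : String :=
  let txt := PySem.Str.strip (PySem.Str.replace (if raw == "" then "" else raw) "\n" " ")
  if (PySem.Str.len txt : Int) ≤ win_chars then txt
  else
    let words := PySem.Str.split₀ txt
    let qset : PySem.Set String :=
      PySem.Set.ofList ((q_terms.filter (fun t => !(t == ""))).map (fun t => pvNorm t))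
    let positions := ((PySem.List.enumerate words 0).filter
        (fun iw => PySem.Set.contains qset (pvNorm iw.2))).map (fun iw => iw.1)
    if positions == [] then PySem.Str.slice txt none (some win_chars)
    else
      let res := positions.foldl (pvStepA words qset) (-1, 0)
      let snippet := PySem.Str.join " " (PySem.List.slice words (some res.2) (some (res.2 + 80)))
      PySem.Str.slice snippet none (some win_chars)

-- ===== PORT B =====
-- the body of B's 'for p, m in enumerate(mask)' loop: window score via the prefix sums
def pvStepB (pref : List Int) (n : Int) (st : Int × Int) (pm : Int × Int) : Int × Int :=
  if pm.2 ≠ 0 then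
    let L := max 0 (pm.1 - 20)
    let score := (PySem.List.pyGet? pref (min n (pm.1 + 20))).getD 0
                 - (PySem.List.pyGet? pref L).getD 0
    if score > st.1 then (score, L) else st
  else st

def best_snippet_alt (raw : String) (q_terms : List String) (win_chars : Int) : String :=
  let txt := PySem.Str.strip (PySem.Str.replace (if raw == "" then "" else raw) "\n" " ")
  if (PySem.Str.len txt : Int) ≤ win_chars then txt
  else
    let words := PySem.Str.split₀ txt
    let qset : PySem.Set String :=
      PySem.Set.ofList ((q_terms.filter (fun t => !(t == ""))).map (fun t => pvNorm t))
    let mask := words.map (fun w => if PySem.Set.contains qset (pvNorm w) then (1 : Int) else 0)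
    -- 'pref=[0]; for m in mask: s+=m; pref.append(s)' — append loop ported as cons + final reverse
    let pref := ((mask.foldl (fun (st : Int × List Int) m =>
        (st.1 + m, (st.1 + m) :: st.2)) (0, [0])).2).reverse
    let n : Int := (words.length : Int)
    let res := (PySem.List.enumerate mask 0).foldl (pvStepB pref n) (-1, 0)
    if res.1 < 0 then PySem.Str.slice txt none (some win_chars)
    else
      let snippet := PySem.Str.join " " (PySem.List.slice words (some res.2) (some (res.2 + 80)))
      PySem.Str.slice snippet none (some win_chars)

-- ===== PRECONDITION & SPEC =====
def Spec_best_snippet (raw : String) (q_terms : List String) (win_chars : Int) (out : String) : Prop := out = best_snippet_alt raw q_terms win_chars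
instance (raw : String) (q_terms : List String) (win_chars : Int) (out : String) : Decidable (Spec_best_snippet raw q_terms win_chars out) := by unfold Spec_best_snippet; infer_instance

-- ===== CLAIM (what is proved, stated in full; the proofs are below) =====
def Claim_equal_best_snippet : Prop := ∀ (raw : String) (q_terms : List String) (win_chars : Int), Dom_best_snippet raw q_terms win_chars → Spec_best_snippet raw q_terms win_chars (best_snippet raw q_terms win_chars)

-- ===== LEMMAS AND PROOFS =====

-- the successive partial sums s+m1, s+m1+m2, …
def pvSums (s : Int) : List Int → List Int
  | [] => []
  | m :: ms => (s + m) :: pvSums (s + m) ms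

theorem pvPref_fold (mask : List Int) : ∀ (s : Int) (acc : List Int),
    ((mask.foldl (fun (st : Int × List Int) m => (st.1 + m, (st.1 + m) :: st.2)) (s, acc)).2).reverse
      = acc.reverse ++ pvSums s mask := by
  induction mask with
  | nil => intro s acc; simp [pvSums]
  | cons m ms ih =>
      intro s acc
      simp [List.foldl_cons, ih, pvSums]

theorem pvSums_getElem? (mask : List Int) : ∀ (s : Int) (i : Nat), i ≤ mask.length →
    (s :: pvSums s mask)[i]? = some (s + (mask.take i).sum) := by
  induction mask with
  | nil => intro s i hi; simp at hi; subst hi; simp [pvSums]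
  | cons m ms ih =>
      intro s i hi
      cases i with
      | zero => simp
      | succ j =>
          have := ih (s + m) j (by simpa using hi)
          simp only [pvSums, List.getElem?_cons_succ, List.take_succ_cons, List.sum_cons] at *
          rw [this]; ring_nf

-- count of matches = sum of 0/1 indicators
theorem pvCount_eq_sum (g : String → Bool) (xs : List String) :
    ((xs.filter g).length : Int) = (xs.map (fun w => if g w then (1 : Int) else 0)).sum := by
  induction xs with
  | nil => simp
  | cons x xs ih => by_cases h : g x <;> simp [h, ih] <;> ring

theorem pvWindow (xs : List Int) (a b : Nat) (h : a ≤ b) :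
    ((xs.drop a).take (b - a)).sum = (xs.take b).sum - (xs.take a).sum := by
  have hb : b = a + (b - a) := by omega
  conv_rhs => rw [hb]
  rw [List.take_add, List.sum_append]
  ring

-- the prefix-sum window score equals A's rescanned window count
theorem pvScore_eq (words : List String) (g : String → Bool) (i : Int)
    (h0 : 0 ≤ i) (hlt : i < (words.length : Int)) :
    (PySem.List.pyGet? (0 :: pvSums 0 (words.map (fun w => if g w then (1 : Int) else 0)))
        (min ((words.length : Int)) (i + 20))).getD 0
      - (PySem.List.pyGet? (0 :: pvSums 0 (words.map (fun w => if g w then (1 : Int) else 0)))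
        (max 0 (i - 20))).getD 0
    = (((PySem.List.slice words (some (max 0 (i - 20)))
          (some (min ((words.length : Int)) (i + 20)))).filter g).length : Int) := by
  set mask := words.map (fun w => if g w then (1 : Int) else 0) with hmask
  have hlen : mask.length = words.length := by simp [hmask]
  have hR0 : (0 : Int) ≤ min ((words.length : Int)) (i + 20) := by omega
  have hL0 : (0 : Int) ≤ max 0 (i - 20) := by omega
  have hLR : (max 0 (i - 20)).toNat ≤ (min ((words.length : Int)) (i + 20)).toNat := by omega
  have hRlen : (min ((words.length : Int)) (i + 20)).toNat ≤ mask.length := by omega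
  have hLlen : (max 0 (i - 20)).toNat ≤ mask.length := by omega
  rw [PySem.List.pyGet?_of_nonneg _ hR0, PySem.List.pyGet?_of_nonneg _ hL0,
    pvSums_getElem? mask 0 _ hRlen, pvSums_getElem? mask 0 _ hLlen,
    PySem.List.slice_toNat _ hL0 hR0,
    pvCount_eq_sum g, List.map_take, List.map_drop, ← hmask,
    pvWindow mask _ _ hLR]
  simp

theorem pvEnumerate_map {α : Type} {β : Type} (g : α → β) (xs : List α) : ∀ (s : Int),
    PySem.List.enumerate (xs.map g) s = (PySem.List.enumerate xs s).map (fun p => (p.1, g p.2)) := by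
  induction xs with
  | nil => intro s; simp [PySem.List.enumerate_nil]
  | cons x xs ih => intro s; simp [PySem.List.enumerate_cons, ih]

-- a guarded fold over (index, word) pairs = the unguarded fold over the filtered pairs
theorem pvGuardFold {α : Type} (g : String → Bool) (body : α → Int → α) :
    ∀ (xs : List (Int × String)) (init : α),
    xs.foldl (fun st pw => if g pw.2 then body st pw.1 else st) init
      = (xs.filter (fun pw => g pw.2)).foldl (fun st pw => body st pw.1) init := by
  intro xs
  induction xs with
  | nil => intro init; rfl
  | cons x xs ih =>
      intro init
      by_cases h : g x.2 <;> simp [h, ih]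

-- once the best score is ≥ 0, A's loop keeps it ≥ 0
theorem pvLoopA_nonneg (words : List String) (qset : PySem.Set String) :
    ∀ (l : List (Int × String)) (st : Int × Int), 0 ≤ st.1 →
    0 ≤ (l.foldl (fun st pw => pvStepA words qset st pw.1) st).1 := by
  intro l
  induction l with
  | nil => intro st h; exact h
  | cons p l ih =>
      intro st h
      simp only [List.foldl_cons]
      apply ih
      unfold pvStepA
      dsimp only
      split
      · positivity
      · exact h

-- B's loop step (on the mask entry of a word) = A's guarded loop step
theorem pvStepB_eq_stepA (words : List String) (qset : PySem.Set String)
    (acc : Int × Int) (pw : Int × String) (hpw : pw ∈ PySem.List.enumerate words 0) :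
    pvStepB (0 :: pvSums 0 (words.map (fun w => if PySem.Set.contains qset (pvNorm w) then (1 : Int) else 0)))
        ((words.length : Int)) acc
        (pw.1, if PySem.Set.contains qset (pvNorm pw.2) then (1 : Int) else 0)
      = if PySem.Set.contains qset (pvNorm pw.2) then pvStepA words qset acc pw.1 else acc := by
  obtain ⟨k, hk, rfl⟩ := (PySem.List.mem_enumerate_iff _ _ _).1 hpw
  have hsc := pvScore_eq words (fun w => PySem.Set.contains qset (pvNorm w)) ((0 : Int) + (k : Nat))
    (by omega) (by omega)
  by_cases hgw : PySem.Set.contains qset (pvNorm words[k])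
  · unfold pvStepB pvStepA
    dsimp only
    rw [if_pos hgw, if_pos (by norm_num : ((1 : Int)) ≠ 0), hsc, if_pos hgw]
  · unfold pvStepB
    dsimp only
    rw [if_neg hgw, if_neg (by norm_num : ¬ ((0 : Int)) ≠ 0), if_neg hgw]

-- the core: A's else-branch = B's else-branch
theorem pvCore (txt : String) (win_chars : Int) (words : List String) (qset : PySem.Set String) :
    (let positions := ((PySem.List.enumerate words 0).filter
        (fun iw => PySem.Set.contains qset (pvNorm iw.2))).map (fun iw => iw.1)
     if positions == [] then PySem.Str.slice txt none (some win_chars)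
     else
       let res := positions.foldl (pvStepA words qset) (-1, 0)
       let snippet := PySem.Str.join " " (PySem.List.slice words (some res.2) (some (res.2 + 80)))
       PySem.Str.slice snippet none (some win_chars))
    = (let mask := words.map (fun w => if PySem.Set.contains qset (pvNorm w) then (1 : Int) else 0)
       let pref := ((mask.foldl (fun (st : Int × List Int) m =>
           (st.1 + m, (st.1 + m) :: st.2)) (0, [0])).2).reverse
       let n : Int := (words.length : Int)
       let res := (PySem.List.enumerate mask 0).foldl (pvStepB pref n) (-1, 0)
       if res.1 < 0 then PySem.Str.slice txt none (some win_chars)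
       else
         let snippet := PySem.Str.join " " (PySem.List.slice words (some res.2) (some (res.2 + 80)))
         PySem.Str.slice snippet none (some win_chars)) := by
  dsimp only
  rw [pvPref_fold]
  simp only [List.reverse_cons, List.reverse_nil, List.nil_append, List.singleton_append]
  rw [pvEnumerate_map, List.foldl_map, List.foldl_map,
    PySem.List.foldl_congr_mem (PySem.List.enumerate words 0) _
      (fun x (y : Int × String) => if PySem.Set.contains qset (pvNorm y.2) then pvStepA words qset x y.1 else x)
      (-1, 0) (pvStepB_eq_stepA words qset),
    pvGuardFold (fun w => PySem.Set.contains qset (pvNorm w)) (pvStepA words qset)]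
  cases hf : (PySem.List.enumerate words 0).filter
      (fun iw => PySem.Set.contains qset (pvNorm iw.2)) with
  | nil => simp
  | cons c rest =>
      have hnn : 0 ≤ ((c :: rest).foldl (fun st pw => pvStepA words qset st pw.1) (-1, 0)).1 := by
        rw [List.foldl_cons]
        apply pvLoopA_nonneg
        unfold pvStepA
        dsimp only
        split
        · positivity
        · omega
      rw [if_neg (by simp), if_neg (by omega)]

-- ===== VERDICT (by name: the statement is the Claim_ definition above) =====
theorem best_snippet_spec : Claim_equal_best_snippet := by
  intro raw q_terms win_chars _
  show best_snippet raw q_terms win_chars = best_snippet_alt raw q_terms win_chars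
  unfold best_snippet best_snippet_alt
  dsimp only
  by_cases hlen : (PySem.Str.len (PySem.Str.strip (PySem.Str.replace (if raw == "" then "" else raw) "\n" " ")) : Int) ≤ win_chars
  · rw [if_pos hlen, if_pos hlen]
  · rw [if_neg hlen, if_neg hlen]
    exact pvCore _ _ _ _
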